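-- pv_equiv track=rewrite | github.com/yys7517/VsCodePython | CosPro/week12_5.py | solution
-- ===== SOURCE A (Python) =====
-- def solution( purchase ) :
--     result = 0  # 상품권 금액
--     for i in purchase :
--         if ( i >= 1000000 ) :
--             result += 50000
--         elif ( i >= 600000 ) :
--             result += 30000
--         elif ( i >= 400000 ) :
--             result += 20000
--         elif ( i >= 200000 ) :
--             result += 10000
--     return result
-- ===== SOURCE B (Python) =====
-- def solution(purchase):
--     thresholds = [200000, 400000, 600000, 1000000]
--     rewards = [0, 10000, 20000, 30000, 50000]
--
--     def idx(x):
--         lo, hi = 0, len(thresholds)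
--         while lo < hi:
--             mid = (lo + hi) // 2
--             if x < thresholds[mid]:
--                 hi = mid
--             else:
--                 lo = mid + 1
--         return lo
--
--     return sum(rewards[idx(i)] for i in purchase)
-- ===== Notes on version B (the rewrite author's own statement) =====
-- stated objective: idiomatic
-- what changed: Replaces the if/elif threshold cascade with a sorted threshold table, a hand-written bisect_right binary search to classify each purchase, and a parallel reward table summed with sum().
import Mathlib
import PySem

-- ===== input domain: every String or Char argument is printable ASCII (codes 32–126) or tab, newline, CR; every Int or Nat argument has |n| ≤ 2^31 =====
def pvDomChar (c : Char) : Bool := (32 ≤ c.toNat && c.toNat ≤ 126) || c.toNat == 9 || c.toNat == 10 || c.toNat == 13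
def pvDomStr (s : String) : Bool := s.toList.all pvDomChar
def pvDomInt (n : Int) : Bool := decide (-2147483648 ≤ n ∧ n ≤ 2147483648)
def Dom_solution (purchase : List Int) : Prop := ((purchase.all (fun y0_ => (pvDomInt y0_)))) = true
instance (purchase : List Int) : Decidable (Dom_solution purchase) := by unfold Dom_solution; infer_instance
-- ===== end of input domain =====

-- B replaces A's if/elif threshold cascade with a sorted threshold table queried by a
-- hand-written bisect_right binary search into a parallel reward table (idiomatic lookup-table form).


-- ===== PORT A =====
def solution (purchase : List Int) : Int :=
  purchase.foldl (fun result i =>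
    if i ≥ 1000000 then result + 50000
    else if i ≥ 600000 then result + 30000
    else if i ≥ 400000 then result + 20000
    else if i ≥ 200000 then result + 10000
    else result) 0

-- ===== PORT B =====
-- the 'while lo < hi' loop of Source B's idx; all indexing is in range, so getD is exact here
def bisectLoop (ths : List Int) (x : Int) (lo hi : Nat) : Nat :=
  if h : lo < hi then
    let mid := (lo + hi) / 2
    if x < ths.getD mid 0 then bisectLoop ths x lo mid else bisectLoop ths x (mid + 1) hi
  else lo
termination_by hi - lo
decreasing_by all_goals omega

def bThresholds : List Int := [200000, 400000, 600000, 1000000]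
def bRewards : List Int := [0, 10000, 20000, 30000, 50000]

def solution_alt (purchase : List Int) : Int :=
  (purchase.map (fun i => bRewards.getD (bisectLoop bThresholds i 0 bThresholds.length) 0)).sum

-- ===== PRECONDITION & SPEC =====
def Spec_solution (purchase : List Int) (out : Int) : Prop := out = solution_alt purchase
instance (purchase : List Int) (out : Int) : Decidable (Spec_solution purchase out) := by unfold Spec_solution; infer_instance

-- ===== CLAIM (what is proved, stated in full; the proofs are below) =====
def Claim_equal_solution : Prop := ∀ (purchase : List Int), Dom_solution purchase → Spec_solution purchase (solution purchase)

-- ===== LEMMAS AND PROOFS =====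
theorem bisect_step (x : Int) (lo hi : Nat) (h : lo < hi) :
    bisectLoop bThresholds x lo hi =
      if x < bThresholds.getD ((lo+hi)/2) 0 then bisectLoop bThresholds x lo ((lo+hi)/2)
      else bisectLoop bThresholds x (((lo+hi)/2)+1) hi := by
  rw [bisectLoop]; simp [h]

theorem bisect_done (x : Int) (lo hi : Nat) (h : ¬ lo < hi) :
    bisectLoop bThresholds x lo hi = lo := by
  rw [bisectLoop]; simp [h]

theorem step_eq (i : Int) :
    (if i ≥ 1000000 then (50000 : Int)
     else if i ≥ 600000 then 30000
     else if i ≥ 400000 then 20000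
     else if i ≥ 200000 then 10000
     else 0)
    = bRewards.getD (bisectLoop bThresholds i 0 bThresholds.length) 0 := by
  show _ = bRewards.getD (bisectLoop bThresholds i 0 4) 0
  rw [bisect_step i 0 4 (by omega),
      show ((0+4)/2 : Nat) = 2 from rfl, show bThresholds.getD 2 0 = 600000 from rfl]
  by_cases h2 : i < 600000
  · rw [if_pos h2, bisect_step i 0 2 (by omega),
        show ((0+2)/2 : Nat) = 1 from rfl, show bThresholds.getD 1 0 = 400000 from rfl]
    by_cases h1 : i < 400000
    · rw [if_pos h1, bisect_step i 0 1 (by omega),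
          show ((0+1)/2 : Nat) = 0 from rfl, show bThresholds.getD 0 0 = 200000 from rfl]
      by_cases h0 : i < 200000
      · rw [if_pos h0, bisect_done i 0 0 (by omega)]
        simp [bRewards]; omega
      · rw [if_neg h0, show ((0+1)/2 : Nat) + 1 = 1 from rfl, bisect_done i 1 1 (by omega)]
        simp [bRewards]; omega
    · rw [if_neg h1, show ((0+2)/2 : Nat) + 1 = 2 from rfl, bisect_done i 2 2 (by omega)]
      simp [bRewards]; omega
  · rw [if_neg h2, show ((0+4)/2 : Nat) + 1 = 3 from rfl, bisect_step i 3 4 (by omega),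
        show ((3+4)/2 : Nat) = 3 from rfl, show bThresholds.getD 3 0 = 1000000 from rfl]
    by_cases h3 : i < 1000000
    · rw [if_pos h3, bisect_done i 3 3 (by omega)]
      simp [bRewards]; omega
    · rw [if_neg h3, show ((3+4)/2 : Nat) + 1 = 4 from rfl, bisect_done i 4 4 (by omega)]
      simp [bRewards]; omega

theorem fold_eq (purchase : List Int) (acc : Int) :
    purchase.foldl (fun result i =>
      if i ≥ 1000000 then result + 50000
      else if i ≥ 600000 then result + 30000
      else if i ≥ 400000 then result + 20000
      else if i ≥ 200000 then result + 10000
      else result) acc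
    = acc + (purchase.map (fun i => bRewards.getD (bisectLoop bThresholds i 0 bThresholds.length) 0)).sum := by
  induction purchase generalizing acc with
  | nil => simp
  | cons x xs ih =>
    simp only [List.foldl_cons, List.map_cons, List.sum_cons, ih]
    have := step_eq x
    split_ifs at this ⊢ <;> omega

-- ===== VERDICT (by name: the statement is the Claim_ definition above) =====
theorem solution_spec : Claim_equal_solution := by
  intro purchase _
  unfold Spec_solution solution solution_alt
  simpa using fold_eq purchase 0
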